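-- pv_equiv track=rewrite | github.com/GnanasundarG/django_proto | schedule/helper_functions.py | set_weekday_variables
-- ===== SOURCE A (Python) =====
-- def set_weekday_variables(input_string):
--     activityStatus = []
--     for i in range(7):
--         if str(i + 1) in str(input_string):
--             activityStatus.append(True)
--         else:
--             activityStatus.append(False)
--     return activityStatus
-- ===== SOURCE B (Python) =====
-- def set_weekday_variables(input_string):
--     result = [False] * 7
--     for ch in str(input_string):
--         if ch in '1234567':
--             result[int(ch) - 1] = True
--     return result
-- ===== Notes on version B (the rewrite author's own statement) =====
-- stated objective: alternative
-- what changed: B makes a single pass over the string's characters writing into a preallocated 7-slot list by digit index, instead of A's seven substring scans of the whole string (one per digit); fewer passes but interpreted per-character work, so no measured speedup.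
import Mathlib
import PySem

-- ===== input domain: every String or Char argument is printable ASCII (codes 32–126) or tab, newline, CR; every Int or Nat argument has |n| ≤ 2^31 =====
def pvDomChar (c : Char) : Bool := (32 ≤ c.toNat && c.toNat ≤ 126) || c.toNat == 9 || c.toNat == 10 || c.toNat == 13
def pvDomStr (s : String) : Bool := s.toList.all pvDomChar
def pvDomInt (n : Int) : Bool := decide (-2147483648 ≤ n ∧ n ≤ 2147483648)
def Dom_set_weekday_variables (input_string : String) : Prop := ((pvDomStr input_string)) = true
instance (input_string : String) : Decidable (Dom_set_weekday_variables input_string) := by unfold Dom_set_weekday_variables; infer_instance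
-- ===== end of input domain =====

-- B makes a single pass over the characters writing into a preallocated 7-slot list by digit
-- index, instead of A's seven substring scans of the whole string (objective: alternative).

-- ===== PORT A =====
def set_weekday_variables (input_string : String) : List Bool :=
  (PySem.List.pyRange 0 7 1).foldl
    (fun acc i =>
      if PySem.Str.isIn (PySem.Int.toStr (i + 1)) input_string then acc ++ [true]
      else acc ++ [false]) []

-- ===== PORT B =====
-- one step of B's loop body: if ch in '1234567': result[int(ch) - 1] = True
def pvBStep (r : List Bool) (ch : Char) : List Bool :=
  if PySem.Chars.isIn [ch] ['1','2','3','4','5','6','7'] then r.set (ch.toNat - 49) true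
  else r

def set_weekday_variables_alt (input_string : String) : List Bool :=
  input_string.toList.foldl pvBStep (List.replicate 7 false)

-- ===== PRECONDITION & SPEC =====
def Spec_set_weekday_variables (input_string : String) (out : List Bool) : Prop := out = set_weekday_variables_alt input_string
instance (input_string : String) (out : List Bool) : Decidable (Spec_set_weekday_variables input_string out) := by unfold Spec_set_weekday_variables; infer_instance

-- ===== CLAIM (what is proved, stated in full; the proofs are below) =====
def Claim_equal_set_weekday_variables : Prop := ∀ (input_string : String), Dom_set_weekday_variables input_string → Spec_set_weekday_variables input_string (set_weekday_variables input_string)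

-- ===== LEMMAS AND PROOFS =====

-- a one-character substring test is character membership
lemma isIn_singleton (c : Char) (l : List Char) :
    PySem.Chars.isIn [c] l = l.contains c := by
  rcases hb : l.contains c with _ | _
  · simp only [Bool.eq_false_iff] at hb ⊢
    intro ht
    rw [PySem.Chars.isIn_iff_infix] at ht
    have hmem := List.singleton_sublist.mp ht.sublist
    exact hb (by simpa using hmem)
  · rw [PySem.Chars.isIn_iff_infix]
    have hmem : c ∈ l := by simpa using hb
    obtain ⟨t, u, rfl⟩ := List.append_of_mem hmem
    exact ⟨t, u, by simp⟩

-- A's loop appends one Boolean per index: it is a map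
lemma foldl_append_bool (p : Int → Bool) (l : List Int) (acc : List Bool) :
    l.foldl (fun a i => if p i then a ++ [true] else a ++ [false]) acc
      = acc ++ l.map p := by
  induction l generalizing acc with
  | nil => simp
  | cons c l ih =>
    simp only [List.foldl_cons, List.map_cons]
    rw [ih]
    cases hp : p c <;> simp

-- one B step on the explicit 7-slot state
lemma pvBStep_eq (c : Char) (b0 b1 b2 b3 b4 b5 b6 : Bool) :
    pvBStep [b0, b1, b2, b3, b4, b5, b6] c =
      [b0 || (c == '1'), b1 || (c == '2'), b2 || (c == '3'), b3 || (c == '4'),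
       b4 || (c == '5'), b5 || (c == '6'), b6 || (c == '7')] := by
  by_cases h : PySem.Chars.isIn [c] ['1','2','3','4','5','6','7'] = true
  · have hc : c ∈ ['1','2','3','4','5','6','7'] := by
      have := (isIn_singleton c ['1','2','3','4','5','6','7']).symm.trans h
      simpa using this.symm
    fin_cases hc <;> simp [pvBStep, h]
  · have hc : c ∉ ['1','2','3','4','5','6','7'] := by
      intro hmem
      exact h (by rw [isIn_singleton]; simpa using hmem)
    simp only [List.mem_cons, List.not_mem_nil, or_false, not_or] at hc
    obtain ⟨h1, h2, h3, h4, h5, h6, h7⟩ := hc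
    simp [pvBStep, h, h1, h2, h3, h4, h5, h6, h7]

-- B's whole loop on the explicit 7-slot state
lemma foldB_eq (cs : List Char) (b0 b1 b2 b3 b4 b5 b6 : Bool) :
    cs.foldl pvBStep [b0, b1, b2, b3, b4, b5, b6] =
      [b0 || cs.contains '1', b1 || cs.contains '2', b2 || cs.contains '3',
       b3 || cs.contains '4', b4 || cs.contains '5', b5 || cs.contains '6',
       b6 || cs.contains '7'] := by
  induction cs generalizing b0 b1 b2 b3 b4 b5 b6 with
  | nil => simp
  | cons c cs ih =>
    rw [List.foldl_cons, pvBStep_eq, ih]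
    have hbeq : ∀ a b : Char, (a == b) = decide (b = a) := by
      intro a b; rw [BEq.comm]; exact Bool.beq_eq_decide_eq b a
    have hsym : ∀ a b : Char, decide (a = b) = decide (b = a) := by
      intro a b; by_cases h : a = b
      · subst h; rfl
      · simp [h, Ne.symm h]
    simp only [List.contains_cons, Bool.or_assoc, hbeq, hsym]

-- ===== VERDICT (by name: the statement is the Claim_ definition above) =====
theorem set_weekday_variables_spec : Claim_equal_set_weekday_variables := by
  intro s _
  unfold Spec_set_weekday_variables set_weekday_variables set_weekday_variables_alt
  rw [show PySem.List.pyRange 0 7 1 = [0, 1, 2, 3, 4, 5, 6] from rfl,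
      foldl_append_bool, show (List.replicate 7 false : List Bool)
        = [false, false, false, false, false, false, false] from rfl,
      foldB_eq]
  simp only [List.map_cons, List.map_nil, List.nil_append, Bool.false_or]
  have hch : ∀ (c : Char) (str : String), str.toList = [c] →
      PySem.Str.isIn str s = s.toList.contains c := by
    intro c str hstr
    rw [show PySem.Str.isIn str s = PySem.Chars.isIn str.toList s.toList from by
          simp, hstr, isIn_singleton]
  rw [hch '1' _ rfl, hch '2' _ rfl, hch '3' _ rfl, hch '4' _ rfl,
      hch '5' _ rfl, hch '6' _ rfl, hch '7' _ rfl]
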